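-- pv_equiv track=rewrite | github.com/loveAlakazam/Algorithm_CEK | Algorithm_study_01/02_탐색_완전탐색/20200122_발표과제/프로그래머스/카펫.py | find_red_wh
-- ===== SOURCE A (Python) =====
-- def find_red_wh(red):
--     r_widths=[]
--     r_heights=[]
--     for x in range(red, 0, -1):
--         if red%x==0: #x는 red에 나누어떨어지는가?
--             y=red//x
--             if x>=y: #너비가 높이보다 길거나 같은가?
--                 r_widths.append(x)
--                 r_heights.append(y)
--     return r_widths , r_heights
-- ===== SOURCE B (Python) =====
-- def find_red_wh(red):
--     # Enumerate only the small divisors (heights y with y*y <= red); width red//y is then automatically >= y.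
--     r_widths = []
--     r_heights = []
--     y = 1
--     while y * y <= red:
--         if red % y == 0:
--             r_widths.append(red // y)
--             r_heights.append(y)
--         y += 1
--     return r_widths, r_heights
-- ===== Notes on version B (the rewrite author's own statement) =====
-- stated objective: faster
-- what changed: Instead of scanning every candidate width x downward over the whole range of red, B enumerates only the heights y with y*y <= red (up to sqrt(red)) and emits width red//y per divisor, yielding the same descending-width lists.
import Mathlib
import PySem

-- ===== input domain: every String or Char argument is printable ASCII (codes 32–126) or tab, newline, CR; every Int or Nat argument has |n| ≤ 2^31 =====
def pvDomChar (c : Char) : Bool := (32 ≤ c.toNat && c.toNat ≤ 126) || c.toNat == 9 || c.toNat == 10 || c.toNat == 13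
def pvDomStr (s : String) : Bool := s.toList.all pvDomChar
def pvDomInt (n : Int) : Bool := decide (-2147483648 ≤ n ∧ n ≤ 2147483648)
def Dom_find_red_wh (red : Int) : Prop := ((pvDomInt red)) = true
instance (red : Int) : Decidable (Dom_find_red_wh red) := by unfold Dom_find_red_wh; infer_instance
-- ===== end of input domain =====

-- B enumerates heights y with y*y ≤ red instead of scanning all widths x from red down to 1;
-- objective: faster (O(sqrt(red)) instead of O(red)), same return value.

-- ===== PORT A =====
def find_red_wh (red : Int) : List Int × List Int :=
  (PySem.List.pyRange red 0 (-1)).foldl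
    (fun acc x =>
      if PySem.Int.mod red x = 0 then
        let y := PySem.Int.floordiv red x
        if y ≤ x then (acc.1 ++ [x], acc.2 ++ [y]) else acc
      else acc)
    ([], [])

-- ===== PORT B =====
-- the 'while y*y <= red' loop of Source B, with its two accumulator lists
def find_red_wh_altLoop (red y : Int) (ws hs : List Int) : List Int × List Int :=
  if y * y ≤ red then
    if PySem.Int.mod red y = 0 then
      find_red_wh_altLoop red (y + 1) (ws ++ [PySem.Int.floordiv red y]) (hs ++ [y])
    else
      find_red_wh_altLoop red (y + 1) ws hs
  else (ws, hs)
termination_by (red + 1 - y).toNat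
decreasing_by
  all_goals
    { have hy : y ≤ y * y := by nlinarith [sq_nonneg (y - 1)]
      omega }

def find_red_wh_alt (red : Int) : List Int × List Int :=
  find_red_wh_altLoop red 1 [] []

-- ===== PRECONDITION & SPEC =====
def Spec_find_red_wh (red : Int) (out : List Int × List Int) : Prop := out = find_red_wh_alt red
instance (red : Int) (out : List Int × List Int) : Decidable (Spec_find_red_wh red out) := by unfold Spec_find_red_wh; infer_instance

-- ===== CLAIM (what is proved, stated in full; the proofs are below) =====
def Claim_equal_find_red_wh : Prop := ∀ (red : Int), Dom_find_red_wh red → Spec_find_red_wh red (find_red_wh red)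


-- ===== LEMMAS AND PROOFS =====

-- the list of heights y ≥ start with y*y ≤ red and red % y == 0, in increasing order
def pvYs (red y : Int) : List Int :=
  if y * y ≤ red then
    if PySem.Int.mod red y = 0 then y :: pvYs red (y + 1) else pvYs red (y + 1)
  else []
termination_by (red + 1 - y).toNat
decreasing_by
  all_goals
    { have hy : y ≤ y * y := by nlinarith [sq_nonneg (y - 1)]
      omega }

-- B's loop appends exactly (map (red//·) of pvYs, pvYs)
theorem pv_altLoop_eq (red y : Int) : ∀ ws hs,
    find_red_wh_altLoop red y ws hs
      = (ws ++ (pvYs red y).map (fun z => PySem.Int.floordiv red z), hs ++ pvYs red y) := by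
  induction y using pvYs.induct (red := red) with
  | case1 y h1 h2 ih =>
    intro ws hs
    rw [find_red_wh_altLoop, pvYs, if_pos h1, if_pos h2, if_pos h1, if_pos h2, ih]
    simp
  | case2 y h1 h2 ih =>
    intro ws hs
    rw [find_red_wh_altLoop, pvYs, if_pos h1, if_neg h2, if_pos h1, if_neg h2, ih]
  | case3 y h1 =>
    intro ws hs
    rw [find_red_wh_altLoop, pvYs, if_neg h1, if_neg h1]
    simp

def pvP (red : Int) (x : Int) : Bool :=
  decide (PySem.Int.mod red x = 0 ∧ PySem.Int.floordiv red x ≤ x)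

-- A's fold appends exactly (filter (pvP red), map (red//·) of that filter)
theorem pv_foldA_eq (red : Int) : ∀ (l : List Int) (ws hs : List Int),
    l.foldl
      (fun acc x =>
        if PySem.Int.mod red x = 0 then
          let y := PySem.Int.floordiv red x
          if y ≤ x then (acc.1 ++ [x], acc.2 ++ [y]) else acc
        else acc)
      (ws, hs)
      = (ws ++ l.filter (pvP red), hs ++ (l.filter (pvP red)).map (fun z => PySem.Int.floordiv red z)) := by
  intro l
  induction l with
  | nil => intro ws hs; simp
  | cons a l ih =>
    intro ws hs
    by_cases h1 : PySem.Int.mod red a = 0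
    · by_cases h2 : PySem.Int.floordiv red a ≤ a
      · have hp : pvP red a = true := by simp [pvP, h1, h2]
        simp only [List.foldl_cons, List.filter_cons, hp, if_pos h1, if_pos h2, ih]
        simp
      · have hp : pvP red a = false := by simp [pvP, h2]
        simp only [List.foldl_cons, List.filter_cons, hp, if_pos h1, if_neg h2, ih]
        simp
    · have hp : pvP red a = false := by simp [pvP, h1]
      simp only [List.foldl_cons, List.filter_cons, hp, if_neg h1, ih]
      simp

theorem pv_mem_Ys (red z y : Int) (hy : 1 ≤ y) :
    z ∈ pvYs red y ↔ y ≤ z ∧ z * z ≤ red ∧ PySem.Int.mod red z = 0 := by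
  revert hy
  induction y using pvYs.induct (red := red) with
  | case1 y h1 h2 ih =>
    intro hy
    rw [pvYs, if_pos h1, if_pos h2]
    have ih' := ih (by omega)
    simp only [List.mem_cons, ih']
    constructor
    · rintro (rfl | ⟨ha, hb, hc⟩)
      · exact ⟨le_refl _, h1, h2⟩
      · exact ⟨by omega, hb, hc⟩
    · rintro ⟨ha, hb, hc⟩
      rcases eq_or_lt_of_le ha with rfl | h
      · exact Or.inl rfl
      · exact Or.inr ⟨by omega, hb, hc⟩
  | case2 y h1 h2 ih =>
    intro hy
    rw [pvYs, if_pos h1, if_neg h2]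
    rw [ih (by omega)]
    constructor
    · rintro ⟨ha, hb, hc⟩; exact ⟨by omega, hb, hc⟩
    · rintro ⟨ha, hb, hc⟩
      rcases eq_or_lt_of_le ha with rfl | h
      · exact absurd hc h2
      · exact ⟨by omega, hb, hc⟩
  | case3 y h1 =>
    intro hy
    rw [pvYs, if_neg h1]
    simp only [List.not_mem_nil, false_iff]
    rintro ⟨ha, hb, hc⟩
    have : y * y ≤ z * z := by nlinarith
    omega

theorem pv_pairwise_Ys (red y : Int) (hy : 1 ≤ y) : (pvYs red y).Pairwise (· < ·) := by
  revert hy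
  induction y using pvYs.induct (red := red) with
  | case1 y h1 h2 ih =>
    intro hy
    rw [pvYs, if_pos h1, if_pos h2]
    refine List.pairwise_cons.2 ⟨?_, ih (by omega)⟩
    intro z hz
    have := (pv_mem_Ys red z (y + 1) (by omega)).1 hz
    omega
  | case2 y h1 h2 ih =>
    intro hy
    rw [pvYs, if_pos h1, if_neg h2]
    exact ih (by omega)
  | case3 y h1 =>
    intro hy
    rw [pvYs, if_neg h1]; exact List.Pairwise.nil

-- arithmetic toolkit for divisors of red ≥ 1
theorem pv_div_mul (red z : Int) (hz : 0 < z) (hd : PySem.Int.mod red z = 0) :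
    PySem.Int.floordiv red z * z = red := by
  rw [PySem.Int.floordiv_eq_ediv_of_pos hz]
  exact Int.ediv_mul_cancel ((PySem.Int.mod_eq_zero_iff_dvd red z).1 hd)

theorem pv_div_div (red z : Int) (hred : 1 ≤ red) (hz : 0 < z) (hd : PySem.Int.mod red z = 0) :
    PySem.Int.floordiv red (PySem.Int.floordiv red z) = z := by
  have h1 := pv_div_mul red z hz hd
  have hq : 0 < PySem.Int.floordiv red z := by nlinarith
  rw [PySem.Int.floordiv_eq_iff_of_pos hq]
  exact ⟨by nlinarith, by nlinarith⟩

theorem pv_div_dvd_mod (red z : Int) (hz : 0 < z) (hd : PySem.Int.mod red z = 0) :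
    PySem.Int.mod red (PySem.Int.floordiv red z) = 0 := by
  rw [PySem.Int.mod_eq_zero_iff_dvd]
  exact ⟨z, (pv_div_mul red z hz hd).symm⟩

-- the central set identity: A's filtered widths = map (red//·) of B's heights
theorem pv_main (red : Int) (hred : 1 ≤ red) :
    (PySem.List.pyRange red 0 (-1)).filter (pvP red)
      = (pvYs red 1).map (fun z => PySem.Int.floordiv red z) := by
  have memA : ∀ x, x ∈ (PySem.List.pyRange red 0 (-1)).filter (pvP red)
      ↔ (0 < x ∧ x ≤ red ∧ PySem.Int.mod red x = 0 ∧ PySem.Int.floordiv red x ≤ x) := by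
    intro x
    rw [List.mem_filter, PySem.List.mem_pyRange_neg_one]
    simp only [pvP, decide_eq_true_eq]
    tauto
  have memB : ∀ x, x ∈ (pvYs red 1).map (fun z => PySem.Int.floordiv red z)
      ↔ (0 < x ∧ x ≤ red ∧ PySem.Int.mod red x = 0 ∧ PySem.Int.floordiv red x ≤ x) := by
    intro x
    rw [List.mem_map]
    constructor
    · rintro ⟨z, hz, rfl⟩
      obtain ⟨hz1, hz2, hz3⟩ := (pv_mem_Ys red z 1 le_rfl).1 hz
      have hgz := pv_div_mul red z (by omega) hz3
      have hx1 : 0 < PySem.Int.floordiv red z := by nlinarith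
      have hzle : z ≤ PySem.Int.floordiv red z := by nlinarith
      refine ⟨hx1, by nlinarith, pv_div_dvd_mod red z (by omega) hz3, ?_⟩
      rw [pv_div_div red z hred (by omega) hz3]
      exact hzle
    · rintro ⟨hx1, hx2, hx3, hx4⟩
      refine ⟨PySem.Int.floordiv red x, ?_, pv_div_div red x hred hx1 hx3⟩
      rw [pv_mem_Ys red _ 1 le_rfl]
      have hgx := pv_div_mul red x hx1 hx3
      have h1 : 1 ≤ PySem.Int.floordiv red x := by nlinarith
      refine ⟨h1, by nlinarith, pv_div_dvd_mod red x hx1 hx3⟩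
  have pwA : ((PySem.List.pyRange red 0 (-1)).filter (pvP red)).Pairwise (· > ·) := by
    refine List.Pairwise.filter _ ?_
    rw [PySem.List.pyRange_neg_one_eq_reverse, List.pairwise_reverse]
    exact PySem.List.pairwise_lt_pyRange_one 1 (red + 1)
  have pwB : ((pvYs red 1).map (fun z => PySem.Int.floordiv red z)).Pairwise (· > ·) := by
    have h := pv_pairwise_Ys red 1 le_rfl
    rw [List.pairwise_map]
    refine List.Pairwise.imp_of_mem ?_ h
    intro a b ha hb hab
    obtain ⟨ha1, ha2, ha3⟩ := (pv_mem_Ys red a 1 le_rfl).1 ha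
    obtain ⟨hb1, hb2, hb3⟩ := (pv_mem_Ys red b 1 le_rfl).1 hb
    have hga := pv_div_mul red a (by omega) ha3
    have hgb := pv_div_mul red b (by omega) hb3
    have h1 : 0 < PySem.Int.floordiv red a := by nlinarith
    have h2 : 0 < PySem.Int.floordiv red b := by nlinarith
    by_contra hc
    push Not at hc
    nlinarith
  have hperm : ((PySem.List.pyRange red 0 (-1)).filter (pvP red)).Perm
      ((pvYs red 1).map (fun z => PySem.Int.floordiv red z)) := by
    rw [List.perm_ext_iff_of_nodup (pwA.imp (fun h => ne_of_gt h)) (pwB.imp (fun h => ne_of_gt h))]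
    intro x
    rw [memA, memB]
  exact List.Perm.eq_of_pairwise (fun a b _ _ h1 h2 => by omega) pwA pwB hperm

-- ===== VERDICT (by name: the statement is the Claim_ definition above) =====
theorem find_red_wh_spec : Claim_equal_find_red_wh := by
  intro red _
  unfold Spec_find_red_wh find_red_wh find_red_wh_alt
  rw [pv_foldA_eq red, pv_altLoop_eq red 1]
  by_cases hred : 1 ≤ red
  · rw [pv_main red hred]
    simp only [List.nil_append]
    congr 1
    rw [List.map_map]
    refine (List.map_congr_left ?_).trans (List.map_id _)
    intro z hz
    obtain ⟨hz1, hz2, hz3⟩ := (pv_mem_Ys red z 1 le_rfl).1 hz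
    exact pv_div_div red z hred (by omega) hz3
  · have hR : PySem.List.pyRange red 0 (-1) = [] :=
      PySem.List.pyRange_neg_one_eq_nil (by omega)
    have hY : pvYs red 1 = [] := by
      rw [pvYs, if_neg (by omega)]
    rw [hR, hY]
    simp
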